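-- pv_equiv track=rewrite | github.com/Hoovely/Ps-Algorithm | Ps_Algorithm/Python/2021년/3월/0324 별 찍기-10_오답3.py | draw_star
-- ===== SOURCE A (Python) =====
-- def draw_star(lst):
--     new_star = []
--     for i in range(3*len(lst)):
--         if i // len(lst) == 1:
--             new_star.append(lst[i % len(lst)] + ' ' * len(lst) + lst[i % len(lst)])
--         else:
--             new_star.append(lst[i % len(lst)] * 3)
--     return new_star
-- ===== SOURCE B (Python) =====
-- def draw_star(lst):
--     top = [s * 3 for s in lst]
--     middle = [s + ' ' * len(lst) + s for s in lst]
--     return top + middle + top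
-- ===== Notes on version B (the rewrite author's own statement) =====
-- stated objective: simpler
-- what changed: Replaces the single loop over range(3*len(lst)) with its i//len branch and i%len modular indexing by three direct passes over lst (top, middle, top) concatenated.
import Mathlib
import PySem

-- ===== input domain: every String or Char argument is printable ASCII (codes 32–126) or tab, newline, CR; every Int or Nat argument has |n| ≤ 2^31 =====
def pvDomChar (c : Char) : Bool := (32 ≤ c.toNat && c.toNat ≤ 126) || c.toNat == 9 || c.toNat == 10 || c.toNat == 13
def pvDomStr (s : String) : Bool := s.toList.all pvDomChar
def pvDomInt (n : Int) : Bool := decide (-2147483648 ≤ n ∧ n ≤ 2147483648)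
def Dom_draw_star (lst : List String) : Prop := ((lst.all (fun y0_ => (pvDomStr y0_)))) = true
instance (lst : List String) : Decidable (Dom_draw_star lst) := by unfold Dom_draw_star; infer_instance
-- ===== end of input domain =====

-- B rewrites A's single indexed loop (i//len branch, i%len indexing) as three direct passes over lst; objective: simpler.

-- ===== PORT A =====
-- Python 'a + b' on strings (exact: list-level append under toList/ofList)
def pyStrCat (a b : String) : String := String.ofList (a.toList ++ b.toList)
-- Python 's * k' on a string (exact: PySem.List.pyRepeat on the character list)
def pyStrMul (s : String) (k : Int) : String := String.ofList (PySem.List.pyRepeat s.toList k)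

def draw_star (lst : List String) : List String :=
  let n : Int := lst.length
  (PySem.List.pyRange 0 (3 * n) 1).foldl (fun new_star i =>
    if PySem.Int.floordiv i n = 1 then
      new_star ++ [pyStrCat (pyStrCat (PySem.List.pyGetD lst (PySem.Int.mod i n) "") (pyStrMul " " n)) (PySem.List.pyGetD lst (PySem.Int.mod i n) "")]
    else
      new_star ++ [pyStrMul (PySem.List.pyGetD lst (PySem.Int.mod i n) "") 3]) []

-- ===== PORT B =====
def draw_star_alt (lst : List String) : List String :=
  let n : Int := lst.length
  let top := lst.map (fun s => pyStrMul s 3)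
  let middle := lst.map (fun s => pyStrCat (pyStrCat s (pyStrMul " " n)) s)
  top ++ middle ++ top

-- ===== PRECONDITION & SPEC =====
def Spec_draw_star (lst : List String) (out : List String) : Prop := out = draw_star_alt lst
instance (lst : List String) (out : List String) : Decidable (Spec_draw_star lst out) := by unfold Spec_draw_star; infer_instance

-- ===== CLAIM (what is proved, stated in full; the proofs are below) =====
def Claim_equal_draw_star : Prop := ∀ (lst : List String), Dom_draw_star lst → Spec_draw_star lst (draw_star lst)

-- ===== LEMMAS AND PROOFS =====

-- shift a range by n under map
lemma map_pyRange_shift (n : Int) (_hn : 0 ≤ n) (a : Int) (f : Int → String) :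
    (PySem.List.pyRange (a + n) (a + 2 * n) 1).map f
      = (PySem.List.pyRange a (a + n) 1).map (fun i => f (i + n)) := by
  rw [PySem.List.pyRange_one, PySem.List.pyRange_one]
  have h1 : (a + 2 * n - (a + n)) = n := by ring
  have h2 : (a + n - a) = n := by ring
  rw [h1, h2]
  simp only [List.map_map]
  apply List.map_congr_left
  intro k _
  simp only [Function.comp]
  ring_nf

lemma map_range_getD (lst : List String) (h : String → String) :
    (PySem.List.pyRange 0 (lst.length : Int) 1).map
        (fun i => h (PySem.List.pyGetD lst i "")) = lst.map h := by
  have := PySem.List.map_pyGetD_pyRange_zero' lst ""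
  calc (PySem.List.pyRange 0 (lst.length : Int) 1).map (fun i => h (PySem.List.pyGetD lst i ""))
      = ((PySem.List.pyRange 0 (lst.length : Int) 1).map (fun i => PySem.List.pyGetD lst i "")).map h := by
        rw [List.map_map]; simp [Function.comp]
    _ = lst.map h := by rw [this]

theorem draw_star_spec : Claim_equal_draw_star := by
  intro lst _
  unfold Spec_draw_star draw_star draw_star_alt
  dsimp only
  have hn0 : (0:Int) ≤ (lst.length : Int) := by positivity
  have hbody : (fun (new_star : List String) (i : Int) =>
      if PySem.Int.floordiv i (lst.length : Int) = 1 then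
        new_star ++ [pyStrCat (pyStrCat (PySem.List.pyGetD lst (PySem.Int.mod i (lst.length : Int)) "") (pyStrMul " " (lst.length : Int))) (PySem.List.pyGetD lst (PySem.Int.mod i (lst.length : Int)) "")]
      else new_star ++ [pyStrMul (PySem.List.pyGetD lst (PySem.Int.mod i (lst.length : Int)) "") 3])
      = (fun new_star i => new_star ++
        [if PySem.Int.floordiv i (lst.length : Int) = 1 then
          pyStrCat (pyStrCat (PySem.List.pyGetD lst (PySem.Int.mod i (lst.length : Int)) "") (pyStrMul " " (lst.length : Int))) (PySem.List.pyGetD lst (PySem.Int.mod i (lst.length : Int)) "")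
         else pyStrMul (PySem.List.pyGetD lst (PySem.Int.mod i (lst.length : Int)) "") 3]) := by
    funext a i; split_ifs <;> rfl
  rw [hbody, PySem.List.foldl_append_singleton_eq_map]
  rw [PySem.List.pyRange_one_append 0 (lst.length : Int) (3 * (lst.length : Int)) (by omega) (by omega),
      PySem.List.pyRange_one_append (lst.length : Int) (2 * (lst.length : Int)) (3 * (lst.length : Int)) (by omega) (by omega)]
  simp only [List.map_append, List.nil_append, List.append_assoc]
  congr 1
  · -- first segment: i in [0, n), floordiv = 0, mod = i
    have hseg : (PySem.List.pyRange 0 (lst.length : Int) 1).map (fun i =>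
        if PySem.Int.floordiv i (lst.length : Int) = 1 then
          pyStrCat (pyStrCat (PySem.List.pyGetD lst (PySem.Int.mod i (lst.length : Int)) "") (pyStrMul " " (lst.length : Int))) (PySem.List.pyGetD lst (PySem.Int.mod i (lst.length : Int)) "")
        else pyStrMul (PySem.List.pyGetD lst (PySem.Int.mod i (lst.length : Int)) "") 3)
        = (PySem.List.pyRange 0 (lst.length : Int) 1).map (fun i => pyStrMul (PySem.List.pyGetD lst i "") 3) := by
      apply List.map_congr_left
      intro i hi
      rw [PySem.List.mem_pyRange_one] at hi
      have hpos : (0:Int) < (lst.length : Int) := by omega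
      have hfd : PySem.Int.floordiv i (lst.length : Int) = 0 := by
        rw [PySem.Int.floordiv_eq_iff_of_pos hpos]; omega
      have hmod : PySem.Int.mod i (lst.length : Int) = i := by
        rw [PySem.Int.mod_eq_emod_of_pos hpos]
        exact Int.emod_eq_of_lt (by omega) (by omega)
      rw [hfd, hmod]; simp
    rw [hseg]; exact map_range_getD lst (fun s => pyStrMul s 3)
  congr 1
  · -- middle segment: i in [n, 2n), floordiv = 1, mod = i - n
    have h1 : (PySem.List.pyRange (lst.length : Int) (2 * (lst.length : Int)) 1).map (fun i =>
        if PySem.Int.floordiv i (lst.length : Int) = 1 then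
          pyStrCat (pyStrCat (PySem.List.pyGetD lst (PySem.Int.mod i (lst.length : Int)) "") (pyStrMul " " (lst.length : Int))) (PySem.List.pyGetD lst (PySem.Int.mod i (lst.length : Int)) "")
        else pyStrMul (PySem.List.pyGetD lst (PySem.Int.mod i (lst.length : Int)) "") 3)
        = (PySem.List.pyRange (lst.length : Int) (2 * (lst.length : Int)) 1).map (fun i =>
            pyStrCat (pyStrCat (PySem.List.pyGetD lst (i - (lst.length : Int)) "") (pyStrMul " " (lst.length : Int))) (PySem.List.pyGetD lst (i - (lst.length : Int)) "")) := by
      apply List.map_congr_left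
      intro i hi
      rw [PySem.List.mem_pyRange_one] at hi
      have hpos : (0:Int) < (lst.length : Int) := by omega
      have hfd : PySem.Int.floordiv i (lst.length : Int) = 1 := by
        rw [PySem.Int.floordiv_eq_iff_of_pos hpos]; omega
      have hmod : PySem.Int.mod i (lst.length : Int) = i - (lst.length : Int) := by
        rw [PySem.Int.mod_eq_emod_of_pos hpos, ← Int.sub_emod_right i (lst.length : Int)]
        exact Int.emod_eq_of_lt (by omega) (by omega)
      rw [hfd, hmod]; simp
    have h2 : (PySem.List.pyRange (lst.length : Int) (2 * (lst.length : Int)) 1).map (fun i =>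
            pyStrCat (pyStrCat (PySem.List.pyGetD lst (i - (lst.length : Int)) "") (pyStrMul " " (lst.length : Int))) (PySem.List.pyGetD lst (i - (lst.length : Int)) ""))
        = (PySem.List.pyRange 0 (lst.length : Int) 1).map (fun i =>
            pyStrCat (pyStrCat (PySem.List.pyGetD lst i "") (pyStrMul " " (lst.length : Int))) (PySem.List.pyGetD lst i "")) := by
      have hs := map_pyRange_shift (lst.length : Int) hn0 0 (fun i =>
            pyStrCat (pyStrCat (PySem.List.pyGetD lst (i - (lst.length : Int)) "") (pyStrMul " " (lst.length : Int))) (PySem.List.pyGetD lst (i - (lst.length : Int)) ""))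
      simp only [zero_add] at hs
      rw [hs]
      apply List.map_congr_left
      intro i _
      simp
    rw [h1, h2]
    exact map_range_getD lst (fun s => pyStrCat (pyStrCat s (pyStrMul " " (lst.length : Int))) s)
  · -- last segment: i in [2n, 3n), floordiv = 2, mod = i - 2n
    have h1 : (PySem.List.pyRange (2 * (lst.length : Int)) (3 * (lst.length : Int)) 1).map (fun i =>
        if PySem.Int.floordiv i (lst.length : Int) = 1 then
          pyStrCat (pyStrCat (PySem.List.pyGetD lst (PySem.Int.mod i (lst.length : Int)) "") (pyStrMul " " (lst.length : Int))) (PySem.List.pyGetD lst (PySem.Int.mod i (lst.length : Int)) "")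
        else pyStrMul (PySem.List.pyGetD lst (PySem.Int.mod i (lst.length : Int)) "") 3)
        = (PySem.List.pyRange (2 * (lst.length : Int)) (3 * (lst.length : Int)) 1).map (fun i => pyStrMul (PySem.List.pyGetD lst (i - 2 * (lst.length : Int)) "") 3) := by
      apply List.map_congr_left
      intro i hi
      rw [PySem.List.mem_pyRange_one] at hi
      have hpos : (0:Int) < (lst.length : Int) := by omega
      have hfd : PySem.Int.floordiv i (lst.length : Int) = 2 := by
        rw [PySem.Int.floordiv_eq_iff_of_pos hpos]; omega
      have hmod : PySem.Int.mod i (lst.length : Int) = i - 2 * (lst.length : Int) := by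
        rw [PySem.Int.mod_eq_emod_of_pos hpos, ← Int.sub_emod_right i (lst.length : Int),
            ← Int.sub_emod_right (i - (lst.length : Int)) (lst.length : Int)]
        have e : i - (lst.length : Int) - (lst.length : Int) = i - 2 * (lst.length : Int) := by ring
        rw [e]
        exact Int.emod_eq_of_lt (by omega) (by omega)
      rw [hfd, hmod]; simp
    have h2 : (PySem.List.pyRange (2 * (lst.length : Int)) (3 * (lst.length : Int)) 1).map (fun i => pyStrMul (PySem.List.pyGetD lst (i - 2 * (lst.length : Int)) "") 3)
        = (PySem.List.pyRange 0 (lst.length : Int) 1).map (fun i => pyStrMul (PySem.List.pyGetD lst i "") 3) := by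
      have hs := map_pyRange_shift (lst.length : Int) hn0 (lst.length : Int) (fun i => pyStrMul (PySem.List.pyGetD lst (i - 2 * (lst.length : Int)) "") 3)
      have e1 : (lst.length : Int) + (lst.length : Int) = 2 * (lst.length : Int) := by ring
      have e2 : (lst.length : Int) + 2 * (lst.length : Int) = 3 * (lst.length : Int) := by ring
      rw [e1, e2] at hs
      rw [hs]
      have hs2 := map_pyRange_shift (lst.length : Int) hn0 0 (fun i =>
          pyStrMul (PySem.List.pyGetD lst (i + (lst.length : Int) - 2 * (lst.length : Int)) "") 3)
      simp only [zero_add] at hs2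
      rw [hs2]
      apply List.map_congr_left
      intro i _
      have : i + (lst.length : Int) + (lst.length : Int) - 2 * (lst.length : Int) = i := by ring
      rw [this]
    rw [h1, h2]; exact map_range_getD lst (fun s => pyStrMul s 3)
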